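-- pv_equiv track=rewrite | github.com/Parth369000/Image-to-quiz | ocr_pipeline.py | enforce_four_options
-- ===== SOURCE A (Python) =====
-- def enforce_four_options(parsed_options):
--     enforced = {}
--     for opt in parsed_options:
--         key = opt.get("key")
--         text = opt.get("text", "").strip()
--         if key in {"1", "2", "3", "4"} and text:
--             enforced[key] = text
--     final_options = []
--     for i in range(1, 5):
--         k = str(i)
--         final_options.append({"key": k, "text": enforced.get(k, "?")})
--     return final_options
-- ===== SOURCE B (Python) =====
-- def enforce_four_options(parsed_options):
--     final_options = []
--     for i in range(1, 5):
--         k = str(i)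
--         text = "?"
--         for opt in parsed_options:
--             if opt.get("key") == k:
--                 t = opt.get("text", "").strip()
--                 if t:
--                     text = t
--         final_options.append({"key": k, "text": text})
--     return final_options
-- ===== Notes on version B (the rewrite author's own statement) =====
-- stated objective: simpler
-- what changed: B removes A's intermediate dict entirely: for each of the four slots it scans parsed_options directly, keeping the last entry whose key matches and whose stripped text is non-empty, and appends the result immediately.
import Mathlib
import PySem

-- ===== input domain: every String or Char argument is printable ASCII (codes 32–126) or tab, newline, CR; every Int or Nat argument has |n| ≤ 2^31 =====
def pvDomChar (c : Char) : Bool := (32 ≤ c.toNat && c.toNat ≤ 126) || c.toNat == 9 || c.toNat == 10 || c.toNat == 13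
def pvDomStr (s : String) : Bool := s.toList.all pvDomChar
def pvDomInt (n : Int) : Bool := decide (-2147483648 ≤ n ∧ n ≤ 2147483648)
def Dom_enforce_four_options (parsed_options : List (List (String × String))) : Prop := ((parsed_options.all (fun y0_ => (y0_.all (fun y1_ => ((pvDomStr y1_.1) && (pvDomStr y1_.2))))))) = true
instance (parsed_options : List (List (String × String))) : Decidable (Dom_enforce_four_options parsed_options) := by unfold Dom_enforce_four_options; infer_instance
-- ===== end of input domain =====

-- B drops A's intermediate dict: for each slot "1".."4" it scans parsed_options directly,
-- keeping the last entry with that key and non-empty stripped text (objective: simpler decomposition, same cost).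

-- ===== PORT A =====
-- shared helpers: opt.get("key") and opt.get("text", "").strip()
def pvKeyOf (opt : List (String × String)) : Option String :=
  (PySem.Dict.mk opt).get? "key"

def pvTextOf (opt : List (String × String)) : String :=
  PySem.Str.strip ((PySem.Dict.mk opt).getD "text" "")

-- body of A's first loop: conditional dict overwrite
def pvStepA (d : PySem.Dict String String) (opt : List (String × String)) : PySem.Dict String String :=
  match pvKeyOf opt with
  | some key =>
      if (key == "1" || key == "2" || key == "3" || key == "4") && !(pvTextOf opt == "") then
        d.insert key (pvTextOf opt)
      else d
  | none => d

def enforce_four_options (parsed_options : List (List (String × String))) : List (List (String × String)) :=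
  let enforced := parsed_options.foldl pvStepA PySem.Dict.empty
  (PySem.List.pyRange 1 5 1).map (fun i =>
    let k := PySem.Int.toStr i
    [("key", k), ("text", enforced.getD k "?")])

-- ===== PORT B =====
-- body of B's inner scan for slot k: last matching truthy text wins
def pvStepB (k : String) (acc : String) (opt : List (String × String)) : String :=
  if pvKeyOf opt == some k then
    (if !(pvTextOf opt == "") then pvTextOf opt else acc)
  else acc

def enforce_four_options_alt (parsed_options : List (List (String × String))) : List (List (String × String)) :=
  (PySem.List.pyRange 1 5 1).map (fun i =>
    let k := PySem.Int.toStr i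
    let text := parsed_options.foldl (pvStepB k) "?"
    [("key", k), ("text", text)])

-- ===== PRECONDITION & SPEC =====
def Spec_enforce_four_options (parsed_options : List (List (String × String))) (out : List (List (String × String))) : Prop := out = enforce_four_options_alt parsed_options
instance (parsed_options : List (List (String × String))) (out : List (List (String × String))) : Decidable (Spec_enforce_four_options parsed_options out) := by unfold Spec_enforce_four_options; infer_instance

-- ===== CLAIM (what is proved, stated in full; the proofs are below) =====
def Claim_equal_enforce_four_options : Prop := ∀ (parsed_options : List (List (String × String))), Dom_enforce_four_options parsed_options → Spec_enforce_four_options parsed_options (enforce_four_options parsed_options)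

-- ===== LEMMAS AND PROOFS =====

-- the slot invariant: looking up k in A's dict equals B's last-wins scan, for k one of "1".."4"
lemma pv_slot (k : String) (hk : k = "1" ∨ k = "2" ∨ k = "3" ∨ k = "4") :
    ∀ (opts : List (List (String × String))) (d : PySem.Dict String String),
      (opts.foldl pvStepA d).getD k "?" = opts.foldl (pvStepB k) (d.getD k "?") := by
  intro opts
  induction opts with
  | nil => intro d; rfl
  | cons opt rest ih =>
    intro d
    simp only [List.foldl_cons]
    rw [ih]
    congr 1
    unfold pvStepA pvStepB
    cases hko : pvKeyOf opt with
    | none => simp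
    | some key =>
      by_cases hkey : key = k
      · subst hkey
        have hmem : (key == "1" || key == "2" || key == "3" || key == "4") = true := by
          rcases hk with h | h | h | h <;> simp [h]
        by_cases ht : pvTextOf opt = ""
        · simp [hmem, ht]
        · simp [hmem, ht, PySem.Dict.getD_insert_self]
      · by_cases hc : ((key == "1" || key == "2" || key == "3" || key == "4") && !(pvTextOf opt == "")) = true
        · have hne : k ≠ key := fun h => hkey h.symm
          simp [hc, hkey, PySem.Dict.getD_insert_of_ne (hne := hne)]
        · simp [hc, hkey]

-- ===== VERDICT (by name: the statement is the Claim_ definition above) =====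
theorem enforce_four_options_spec : Claim_equal_enforce_four_options := by
  intro parsed_options _
  unfold Spec_enforce_four_options enforce_four_options enforce_four_options_alt
  have hr : PySem.List.pyRange 1 5 1 = [1, 2, 3, 4] := by decide
  rw [hr]
  simp only [List.map_cons, List.map_nil]
  have h1 := pv_slot "1" (by tauto) parsed_options PySem.Dict.empty
  have h2 := pv_slot "2" (by tauto) parsed_options PySem.Dict.empty
  have h3 := pv_slot "3" (by tauto) parsed_options PySem.Dict.empty
  have h4 := pv_slot "4" (by tauto) parsed_options PySem.Dict.empty
  simp only [PySem.Dict.getD_empty] at h1 h2 h3 h4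
  have e1 : PySem.Int.toStr 1 = "1" := by decide
  have e2 : PySem.Int.toStr 2 = "2" := by decide
  have e3 : PySem.Int.toStr 3 = "3" := by decide
  have e4 : PySem.Int.toStr 4 = "4" := by decide
  simp [e1, e2, e3, e4, h1, h2, h3, h4]
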